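-- pv_equiv track=rewrite | github.com/ewalsh/hackerRank | sorting/py_code/max_toys.py | max_toys
-- ===== SOURCE A (Python) =====
-- def max_toys(k, prices):
--     out = 0
--     prices = list(filter(lambda x: x <= k, prices))
--     prices.sort()
--     # prices = arr.array('i',prices)
--     basket = [0]
--     if len(prices) > 0:
--         found_max = False
--
--         if sum(prices) <= k:
--             basket = basket + prices
--             found_max = True
--
--         if sum(prices) > k:
--             # add to basket until limit
--             i = 0
--             while found_max != True:
--                 basket = basket + [prices[i]]
--                 if sum(basket) > k:
--                     basket = basket[:(len(basket)-1)]
--                     found_max = True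
--                 if sum(basket) == k:
--                     found_max = True
--
--
--                 i = i + 1
--
--     return(len(basket) - 1)
-- ===== SOURCE B (Python) =====
-- def max_toys(k, prices):
--     s = 0
--     count = 0
--     for p in sorted(p for p in prices if p <= k):
--         if s + p > k:
--             break
--         s += p
--         count += 1
--     return count
-- ===== Notes on version B (the rewrite author's own statement) =====
-- stated objective: simpler
-- what changed: Replaced A's basket rebuilding (re-summing the whole basket after each append, plus a slice to undo the last add) by a single greedy pass over the sorted affordable prices with a running sum and counter.
import Mathlib
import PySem

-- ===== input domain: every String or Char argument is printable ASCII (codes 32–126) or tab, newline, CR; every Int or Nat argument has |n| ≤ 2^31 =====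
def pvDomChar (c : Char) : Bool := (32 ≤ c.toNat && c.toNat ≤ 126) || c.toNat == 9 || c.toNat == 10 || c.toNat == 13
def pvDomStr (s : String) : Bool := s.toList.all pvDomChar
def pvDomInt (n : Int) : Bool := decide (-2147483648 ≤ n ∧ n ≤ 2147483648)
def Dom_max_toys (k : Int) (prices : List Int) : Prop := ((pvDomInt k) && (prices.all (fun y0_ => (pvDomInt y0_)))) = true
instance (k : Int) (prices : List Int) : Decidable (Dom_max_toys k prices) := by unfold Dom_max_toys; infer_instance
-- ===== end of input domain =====

-- B replaces A's re-summing basket loop by one greedy pass with a running sum and counter (objective: simpler).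

-- ===== PORT A =====
-- A's while loop: each iteration appends prices[i] to the basket, re-sums it, and
-- undoes the append with a slice when the sum overshoots k.  Ported as structural
-- recursion over the unread suffix of prices.  In the [] case Python would raise
-- IndexError; that case is unreachable whenever A enters the loop (sum prices > k),
-- proved in max_toys_loopA lemmas below.
def maxToysLoopA (k : Int) (basket : List Int) : List Int → List Int
  | [] => basket
  | p :: rest =>
    let b' := basket ++ [p]
    if b'.sum > k then b'.take (b'.length - 1)
    else if b'.sum = k then b'
    else maxToysLoopA k b' rest

def max_toys (k : Int) (prices : List Int) : Int :=
  let ps := PySem.List.sorted (prices.filter (fun x => decide (x ≤ k))) (fun x => x) false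
  -- Python tests 'sum(prices) <= k' and 'sum(prices) > k' in two separate ifs;
  -- they are mutually exclusive and exhaustive, so an if/else is faithful.
  let basket : List Int :=
    if ps.length > 0 then
      if ps.sum ≤ k then [0] ++ ps
      else maxToysLoopA k [0] ps
    else [0]
  (basket.length : Int) - 1

-- ===== PORT B =====
def maxToysAltGo (k s c : Int) : List Int → Int
  | [] => c
  | p :: rest => if s + p > k then c else maxToysAltGo k (s + p) (c + 1) rest

def max_toys_alt (k : Int) (prices : List Int) : Int :=
  maxToysAltGo k 0 0 (PySem.List.sorted (prices.filter (fun p => decide (p ≤ k))) (fun x => x) false)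

-- ===== PRECONDITION & SPEC =====
def Spec_max_toys (k : Int) (prices : List Int) (out : Int) : Prop := out = max_toys_alt k prices
instance (k : Int) (prices : List Int) (out : Int) : Decidable (Spec_max_toys k prices out) := by unfold Spec_max_toys; infer_instance

-- ===== CLAIM (what is proved, stated in full; the proofs are below) =====
def Claim_equal_max_toys : Prop := ∀ (k : Int) (prices : List Int), Dom_max_toys k prices → Spec_max_toys k prices (max_toys k prices)

-- ===== LEMMAS AND PROOFS =====

-- B's greedy pass returns its counter unchanged when the running sum already equals k
-- and everything still ahead is positive.
theorem altGo_stop (k c : Int) (r : List Int) (h : ∀ q ∈ r, 0 < q) :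
    maxToysAltGo k k c r = c := by
  cases r with
  | nil => rfl
  | cons q r' =>
    have hq : 0 < q := h q (by simp)
    simp [maxToysAltGo, show k + q > k by omega]

-- B's greedy pass takes everything when every nonempty prefix stays within budget.
theorem altGo_all (k : Int) : ∀ (r : List Int) (s c : Int),
    (∀ pre suf, r = pre ++ suf → pre ≠ [] → s + pre.sum ≤ k) →
    maxToysAltGo k s c r = c + r.length := by
  intro r
  induction r with
  | nil => intro s c _; simp [maxToysAltGo]
  | cons p r' ih =>
    intro s c h
    have hp : s + p ≤ k := by
      have := h [p] r' (by simp) (by simp)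
      simpa using this
    have hrec := ih (s + p) (c + 1) (fun pre suf hsplit hne => by
      have := h (p :: pre) suf (by simp [hsplit]) (by simp)
      simp at this ⊢
      omega)
    simp [maxToysAltGo, show ¬ (s + p > k) by omega, hrec]
    omega

-- Core correspondence: A's basket loop vs B's running-sum pass.
theorem loopA_eq_altGo (k : Int) : ∀ (r b : List Int),
    b ≠ [] → b.sum < k → k < b.sum + r.sum →
    (∀ pre suf, r = pre ++ suf → b.sum + pre.sum = k → ∀ q ∈ suf, 0 < q) →
    ((maxToysLoopA k b r).length : Int) - 1 = maxToysAltGo k b.sum ((b.length : Int) - 1) r := by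
  intro r
  induction r with
  | nil => intro b _ h1 h2 _; simp at h2; omega
  | cons p r' ih =>
    intro b hbne h1 h2 hq
    by_cases hgt : b.sum + p > k
    · -- overshoot: A drops the appended element, B never adds it
      simp only [maxToysLoopA, maxToysAltGo]
      rw [if_pos (show (b ++ [p]).sum > k by simp; omega), if_pos hgt,
        show (b ++ [p]).length - 1 = b.length by simp, List.take_left' rfl]
    · by_cases heq : b.sum + p = k
      · -- exact hit: A stops with the element added; B adds it then stops
        have hpos : ∀ q ∈ r', 0 < q := hq [p] r' (by simp) (by simpa using heq)
        simp only [maxToysLoopA, maxToysAltGo]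
        rw [if_neg (show ¬ (b ++ [p]).sum > k by simp; omega),
          if_pos (show (b ++ [p]).sum = k by simp; omega), if_neg (by omega), heq,
          altGo_stop k _ r' hpos]
        simp
      · -- still under budget: both recurse
        have hlt : (b ++ [p]).sum < k := by simp; omega
        have hrec := ih (b ++ [p]) (by simp) hlt
          (by simp at h2 ⊢; omega)
          (fun pre suf hsplit hsum => hq (p :: pre) suf (by simp [hsplit])
            (by simp at hsum ⊢; omega))
        have hne : ¬ (b ++ [p]).sum > k := by simp; omega
        have hne2 : ¬ (b ++ [p]).sum = k := by simp; omega
        simp only [maxToysLoopA, maxToysAltGo]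
        rw [if_neg hne, if_neg hne2]
        rw [hrec]
        simp [show ¬ (b.sum + p > k) from hgt]

-- a nonempty list of elements ≤ k ≤ 0 sums to ≤ k
theorem sum_le_k_of_nonpos (k : Int) (hk : k ≤ 0) : ∀ (x : Int) (xs : List Int),
    (∀ y ∈ x :: xs, y ≤ k) → (x :: xs).sum ≤ k := by
  intro x xs
  induction xs generalizing x with
  | nil => intro h; simpa using h x (by simp)
  | cons y ys ih =>
    intro h
    have h1 : x ≤ k := h x (by simp)
    have h2 : (y :: ys).sum ≤ k := ih y (fun z hz => h z (by simp at hz ⊢; tauto))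
    simp at h2 ⊢
    omega

-- a list whose sum is positive has a positive element (and dually for negative)
theorem exists_pos_of_sum_pos : ∀ (l : List Int), 0 < l.sum → ∃ e ∈ l, 0 < e := by
  intro l
  induction l with
  | nil => simp
  | cons x xs ih =>
    intro h
    by_cases hx : 0 < x
    · exact ⟨x, by simp, hx⟩
    · have : 0 < xs.sum := by simp at h; omega
      obtain ⟨e, he, hpe⟩ := ih this
      exact ⟨e, by simp [he], hpe⟩

theorem exists_neg_of_sum_neg : ∀ (l : List Int), l.sum < 0 → ∃ e ∈ l, e < 0 := by
  intro l
  induction l with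
  | nil => simp
  | cons x xs ih =>
    intro h
    by_cases hx : x < 0
    · exact ⟨x, by simp, hx⟩
    · have : xs.sum < 0 := by simp at h; omega
      obtain ⟨e, he, hpe⟩ := ih this
      exact ⟨e, by simp [he], hpe⟩

theorem sum_nonpos_of_all_neg : ∀ (l : List Int), (∀ y ∈ l, y < 0) → l.sum ≤ 0 := by
  intro l
  induction l with
  | nil => simp
  | cons x xs ih =>
    intro h
    have := h x (by simp)
    have := ih (fun y hy => h y (by simp [hy]))
    simp
    omega

-- ===== VERDICT (by name: the statement is the Claim_ definition above) =====
theorem max_toys_spec : Claim_equal_max_toys := by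
  intro k prices _
  unfold Spec_max_toys
  set xs := PySem.List.sorted (prices.filter (fun x => decide (x ≤ k))) (fun x => x) false with hxs
  have hA : max_toys k prices =
      (((if xs.length > 0 then
          if xs.sum ≤ k then [0] ++ xs else maxToysLoopA k [0] xs
        else [0]).length : Int) - 1) := rfl
  have hB : max_toys_alt k prices = maxToysAltGo k 0 0 xs := rfl
  rw [hA, hB]
  have hmem : ∀ x ∈ xs, x ≤ k := by
    intro x hx
    rw [hxs, PySem.List.mem_sorted] at hx
    have := List.of_mem_filter hx
    simpa using this
  have hpair : xs.Pairwise (· ≤ ·) := by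
    have := PySem.List.sorted_pairwise (xs := prices.filter (fun x => decide (x ≤ k))) (key := fun x => x)
    simpa [hxs] using this
  clear_value xs
  cases hxsc : xs with
  | nil => simp [maxToysAltGo]
  | cons x0 xs' =>
    rw [← hxsc]
    have hne : xs ≠ [] := by simp [hxsc]
    by_cases hsum : xs.sum ≤ k
    · -- A takes everything; B's greedy pass also takes everything
      have hall : maxToysAltGo k 0 0 xs = 0 + (xs.length : Int) := by
        apply altGo_all
        intro pre suf hsplit hpre
        -- every nonempty prefix of the sorted list sums to ≤ k
        by_cases hs : 0 ≤ suf.sum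
        · have : xs.sum = pre.sum + suf.sum := by rw [hsplit]; simp
          omega
        · obtain ⟨q, hqmem, hqneg⟩ := exists_neg_of_sum_neg suf (by omega)
          have hcross : ∀ a ∈ pre, a ≤ q := by
            have := (List.pairwise_append.mp (hsplit ▸ hpair)).2.2
            exact fun a ha => this a ha q hqmem
          cases pre with
          | nil => exact absurd rfl hpre
          | cons e pre' =>
            have he : e ≤ k := hmem e (by rw [hsplit]; simp)
            have hpre' : pre'.sum ≤ 0 := sum_nonpos_of_all_neg pre'
              (fun y hy => by have := hcross y (by simp [hy]); omega)
            simp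
            omega
      rw [if_pos (by simp [hxsc]), if_pos hsum, hall]
      simp
    · -- A enters the basket loop; core lemma
      have hk : 0 < k := by
        by_contra hk0
        exact hsum (hxsc ▸ sum_le_k_of_nonpos k (by omega) x0 xs' (hxsc ▸ hmem))
      have hcore := loopA_eq_altGo k xs [0] (by simp) (by simp; omega) (by simp; omega)
        (by
          intro pre suf hsplit hsumk q hqmem
          obtain ⟨e, hemem, hepos⟩ := exists_pos_of_sum_pos pre (by simp at hsumk; omega)
          have := (List.pairwise_append.mp (hsplit ▸ hpair)).2.2 e hemem q hqmem
          omega)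
      rw [if_pos (by simp [hxsc]), if_neg hsum]
      simpa using hcore
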